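-- pv_equiv track=rewrite | github.com/Stormlord2001/MarkerDetectorMaster | generate_marker_codes.py | countBitTransitions
-- ===== SOURCE A (Python) =====
-- def countBitTransitions(code: int) -> int:
--     transitions = 0
--     prev_bit = 0
--
--     while code:
--         new_bit = code & 1
--         # Larger due to transitions being counted as 0->1 only
--         if new_bit > prev_bit:
--             transitions += 1
--         prev_bit = new_bit
--         code >>= 1
--     return transitions
-- ===== SOURCE B (Python) =====
-- def countBitTransitions(code: int) -> int:
--     # 0->1 transitions (scanning from the LSB with implicit previous bit 0)
--     # = number of bits that are 1 where the next-lower bit is 0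
--     # = popcount of code & ~(code << 1), written without ~ as an xor/and mask.
--     masked = code ^ (code & (code << 1))
--     return bin(masked).count("1")
-- ===== Notes on version B (the rewrite author's own statement) =====
-- stated objective: idiomatic
-- what changed: Replaces the stateful LSB-to-MSB while-loop (prev_bit/transitions accumulators) with the closed-form run-start mask code ^ (code & (code << 1)) followed by a popcount of its binary representation.
import Mathlib
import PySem

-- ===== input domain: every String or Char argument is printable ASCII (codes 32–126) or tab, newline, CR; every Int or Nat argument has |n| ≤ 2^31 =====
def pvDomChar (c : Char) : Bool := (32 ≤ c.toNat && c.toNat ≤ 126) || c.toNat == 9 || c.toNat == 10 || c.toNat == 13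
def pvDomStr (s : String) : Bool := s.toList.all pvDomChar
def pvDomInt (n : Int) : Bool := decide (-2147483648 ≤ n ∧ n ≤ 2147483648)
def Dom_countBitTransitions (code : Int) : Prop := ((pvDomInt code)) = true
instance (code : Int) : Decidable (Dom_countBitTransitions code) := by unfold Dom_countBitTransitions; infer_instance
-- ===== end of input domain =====

-- B replaces A's stateful LSB-to-MSB loop with the closed-form run-start mask
-- code ^ (code & (code << 1)) and a popcount (idiomatic; same asymptotic cost).

-- ===== PORT A =====
-- A's while-loop, ported as recursion on the (non-negative) code; exact for
-- code ≥ 0 (= Pre_); the Python loop never terminates for code < 0.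
def countBitTransitionsGo (code prev_bit : Nat) (transitions : Int) : Int :=
  if h : code = 0 then transitions
  else
    let new_bit := code % 2          -- code & 1
    countBitTransitionsGo (code / 2) new_bit
      (if new_bit > prev_bit then transitions + 1 else transitions)
termination_by code
decreasing_by exact Nat.div_lt_self (Nat.pos_of_ne_zero h) one_lt_two

def countBitTransitions (code : Int) : Int :=
  countBitTransitionsGo code.toNat 0 0

-- ===== PORT B =====
-- bin(m).count("1") ported as the corresponding popcount recursion.
def pvPopCount (n : Nat) : Nat :=
  if n = 0 then 0 else n % 2 + pvPopCount (n / 2)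
termination_by n
decreasing_by exact Nat.div_lt_self (Nat.pos_of_ne_zero (by assumption)) one_lt_two

-- masked = code ^ (code & (code << 1)) on Int, exactly as Source B computes it
-- (masked is never negative, so the popcount sees bin(masked) without a sign).
def countBitTransitions_alt (code : Int) : Int :=
  let masked := Int.xor code (Int.land code (Int.shiftLeft code 1))
  (pvPopCount masked.toNat : Int)

-- ===== PRECONDITION & SPEC =====
-- Pre_ excludes code < 0: there Python A's `while code: … code >>= 1` never
-- terminates (right-shifting a negative int stays negative), so A returns on
-- no excluded input.
def Pre_countBitTransitions (code : Int) : Prop := 0 ≤ code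
instance (code : Int) : Decidable (Pre_countBitTransitions code) := by
  unfold Pre_countBitTransitions; infer_instance

def pvWitness_countBitTransitions : Int := (5)

def Spec_countBitTransitions (code : Int) (out : Int) : Prop := out = countBitTransitions_alt code
instance (code : Int) (out : Int) : Decidable (Spec_countBitTransitions code out) := by unfold Spec_countBitTransitions; infer_instance

-- ===== CLAIM (what is proved, stated in full; the proofs are below) =====
def Claim_equal_countBitTransitions : Prop := ∀ (code : Int), Dom_countBitTransitions code → Pre_countBitTransitions code → Spec_countBitTransitions code (countBitTransitions code)

-- ===== LEMMAS AND PROOFS =====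

-- the run-start mask with an explicit previous bit
def pvMask (n prev : Nat) : Nat := n ^^^ (n &&& (2 * n + prev))

theorem pvPopCount_step (x : Nat) : pvPopCount x = x % 2 + pvPopCount (x / 2) := by
  by_cases h : x = 0
  · subst h; simp [pvPopCount]
  · rw [pvPopCount]; simp [h]

theorem mod_two_eq_testBit (x : Nat) : x % 2 = (if x.testBit 0 then 1 else 0) := by
  rcases Nat.mod_two_eq_zero_or_one x with h | h <;> simp [Nat.testBit_zero, h]

theorem pvMask_mod_two (n prev : Nat) (hp : prev ≤ 1) :
    pvMask n prev % 2 = (if n % 2 > prev then 1 else 0) := by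
  rw [mod_two_eq_testBit]
  simp only [pvMask, Nat.testBit_xor, Nat.testBit_and]
  simp only [Nat.testBit_zero]
  have h1 : (2 * n + prev) % 2 = prev := by omega
  rw [h1]
  rcases Nat.mod_two_eq_zero_or_one n with h | h <;> interval_cases prev <;> simp [h]

theorem pvMask_div_two (n prev : Nat) (hp : prev ≤ 1) :
    pvMask n prev / 2 = pvMask (n / 2) (n % 2) := by
  have hn : 2 * (n / 2) + n % 2 = n := by omega
  have hs : (2 * n + prev) / 2 = n := by omega
  apply Nat.eq_of_testBit_eq
  intro i
  have hbit : (2 * n + prev).testBit (i + 1) = n.testBit i := by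
    rw [← Nat.testBit_div_two, hs]
  simp only [pvMask, hn, Nat.testBit_div_two, Nat.testBit_xor, Nat.testBit_and, hbit]

theorem countBitTransitionsGo_eq (n : Nat) :
    ∀ (prev : Nat) (t : Int), prev ≤ 1 →
      countBitTransitionsGo n prev t = t + (pvPopCount (pvMask n prev) : Int) := by
  induction n using Nat.strong_induction_on with
  | _ n ih =>
    intro prev t hp
    by_cases h : n = 0
    · subst h
      simp [countBitTransitionsGo, pvMask, pvPopCount]
    · rw [countBitTransitionsGo]
      simp only [h, dite_false]
      rw [ih (n / 2) (Nat.div_lt_self (Nat.pos_of_ne_zero h) one_lt_two) (n % 2) _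
        (Nat.le_of_lt_succ (Nat.mod_lt n (by omega)))]
      rw [pvPopCount_step (pvMask n prev), pvMask_mod_two n prev hp,
        pvMask_div_two n prev hp]
      split_ifs with hb
      · push_cast; ring
      · push_cast; ring

-- ===== VERDICT (by name: the statement is the Claim_ definition above) =====
theorem countBitTransitions_spec : Claim_equal_countBitTransitions := by
  intro code _ hpre
  obtain ⟨n, rfl⟩ := Int.eq_ofNat_of_zero_le hpre
  unfold Spec_countBitTransitions countBitTransitions countBitTransitions_alt
  rw [Int.toNat_natCast, countBitTransitionsGo_eq n 0 0 (by omega)]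
  have hs : Int.shiftLeft (n : Int) 1 = ((n <<< 1 : Nat) : Int) := by
    simp [Int.shiftLeft]
  have hl : Int.land (n : Int) ((n <<< 1 : Nat) : Int) = ((n &&& n <<< 1 : Nat) : Int) := by
    simp [Int.land]
  have hm : Int.xor (n : Int) (Int.land (n : Int) (Int.shiftLeft (n : Int) 1)) =
      ((n ^^^ (n &&& (n <<< 1)) : Nat) : Int) := by
    rw [hs, hl]; simp [Int.xor]
  have h2 : n <<< 1 = 2 * n := by rw [Nat.shiftLeft_eq]; ring
  simp [hm, pvMask, h2]
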